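-- pv_equiv track=rewrite | github.com/aglinxinyuan/texera | bin/licensing/check_binary_deps.py | diff_simple
-- ===== SOURCE A (Python) =====
-- def diff_simple(
--     claim_idx: dict[str, set[str]],
--     real_idx: dict[str, set[str]],
--     direct_names: set[str],
--     joiner: str,
-- ) -> tuple[list[str], list[str], list[tuple[str, list[str], list[str]]], list[tuple[str, list[str], list[str]]]]:
--     """Diff name->{versions} multimaps for npm/python. `joiner` is the
--     separator used when rendering added/stale entries (`@` for npm, `==`
--     for python). Drifts are returned as (name, sorted_claimed_versions,
--     sorted_real_versions)."""
--     added: list[str] = []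
--     stale: list[str] = []
--     drift_direct: list[tuple[str, list[str], list[str]]] = []
--     drift_transitive: list[tuple[str, list[str], list[str]]] = []
--
--     for name in sorted(real_idx.keys() - claim_idx.keys()):
--         for v in sorted(real_idx[name]):
--             added.append(f"{name}{joiner}{v}")
--     for name in sorted(claim_idx.keys() - real_idx.keys()):
--         for v in sorted(claim_idx[name]):
--             stale.append(f"{name}{joiner}{v}")
--     for name in sorted(claim_idx.keys() & real_idx.keys()):
--         cvers, rvers = claim_idx[name], real_idx[name]
--         if cvers == rvers:
--             continue
--         entry = (name, sorted(cvers), sorted(rvers))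
--         (drift_direct if name in direct_names else drift_transitive).append(entry)
--     return added, stale, drift_direct, drift_transitive
-- ===== SOURCE B (Python) =====
-- def diff_simple(
--     claim_idx: dict[str, set[str]],
--     real_idx: dict[str, set[str]],
--     direct_names: set[str],
--     joiner: str,
-- ) -> tuple[list[str], list[str], list[tuple[str, list[str], list[str]]], list[tuple[str, list[str], list[str]]]]:
--     """Two-pointer merge walk over the two sorted key lists: each key is
--     classified (stale / added / drift) as the pointers advance, with no
--     set-difference or intersection computations at all."""
--     added: list[str] = []
--     stale: list[str] = []
--     drift_direct: list[tuple[str, list[str], list[str]]] = []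
--     drift_transitive: list[tuple[str, list[str], list[str]]] = []
--
--     ck = sorted(claim_idx)
--     rk = sorted(real_idx)
--     i = j = 0
--     while i < len(ck) or j < len(rk):
--         if j == len(rk) or (i < len(ck) and ck[i] < rk[j]):
--             name = ck[i]
--             i += 1
--             for v in sorted(claim_idx[name]):
--                 stale.append(f"{name}{joiner}{v}")
--         elif i == len(ck) or rk[j] < ck[i]:
--             name = rk[j]
--             j += 1
--             for v in sorted(real_idx[name]):
--                 added.append(f"{name}{joiner}{v}")
--         else:
--             name = ck[i]
--             i += 1
--             j += 1
--             cvers, rvers = claim_idx[name], real_idx[name]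
--             if cvers != rvers:
--                 entry = (name, sorted(cvers), sorted(rvers))
--                 (drift_direct if name in direct_names else drift_transitive).append(entry)
--     return added, stale, drift_direct, drift_transitive
-- ===== Notes on version B (the rewrite author's own statement) =====
-- stated objective: alternative
-- what changed: A computes three sorted key-set differences/intersection and loops over each; B never forms a set difference or intersection: it sorts the two key lists once and walks them with a two-pointer merge, classifying each key as stale, added or drift while the pointers advance.
import Mathlib
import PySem

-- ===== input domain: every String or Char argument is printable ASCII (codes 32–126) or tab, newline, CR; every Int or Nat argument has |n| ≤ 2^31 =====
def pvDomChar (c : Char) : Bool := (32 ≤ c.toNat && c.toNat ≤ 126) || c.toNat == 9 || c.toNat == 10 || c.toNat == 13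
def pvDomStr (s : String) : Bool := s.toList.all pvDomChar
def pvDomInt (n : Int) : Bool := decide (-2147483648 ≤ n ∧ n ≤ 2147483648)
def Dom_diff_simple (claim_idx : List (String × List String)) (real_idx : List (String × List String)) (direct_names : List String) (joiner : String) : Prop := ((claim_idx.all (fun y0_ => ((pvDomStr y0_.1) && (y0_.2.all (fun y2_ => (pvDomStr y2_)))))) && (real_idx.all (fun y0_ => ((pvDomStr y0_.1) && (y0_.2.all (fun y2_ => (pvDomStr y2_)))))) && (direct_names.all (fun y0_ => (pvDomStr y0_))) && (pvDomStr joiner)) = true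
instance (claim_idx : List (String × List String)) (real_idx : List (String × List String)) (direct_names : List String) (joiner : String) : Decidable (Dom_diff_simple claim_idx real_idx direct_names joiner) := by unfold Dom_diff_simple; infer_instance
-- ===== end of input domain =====

-- B replaces A's three sorted set-difference/intersection passes by a two-pointer merge
-- walk over the two sorted key lists (objective: alternative algorithm, same cost).

-- `idx[name]` for a dict[str, set[str]] modelled as an association list whose values are
-- Python sets (distinct elements): first matching key, value as a PySem.Set.
def pvVers (idx : List (String × List String)) (name : String) : PySem.Set String :=
  PySem.Set.ofList (((idx.find? (fun p => p.1 == name)).map Prod.snd).getD [])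

-- ===== PORT A =====
def diff_simple (claim_idx : List (String × List String)) (real_idx : List (String × List String)) (direct_names : List String) (joiner : String) : List String × List String × (List (String × List String × List String)) × (List (String × List String × List String)) :=
  let ck : PySem.Set String := PySem.Set.ofList (claim_idx.map Prod.fst)
  let rk : PySem.Set String := PySem.Set.ofList (real_idx.map Prod.fst)
  let added := (PySem.List.sorted (PySem.Set.diff rk ck) (fun x => x) false).foldl
      (fun acc name => acc ++ (PySem.List.sorted (pvVers real_idx name) (fun x => x) false).map
        (fun v => name ++ joiner ++ v)) []
  let stale := (PySem.List.sorted (PySem.Set.diff ck rk) (fun x => x) false).foldl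
      (fun acc name => acc ++ (PySem.List.sorted (pvVers claim_idx name) (fun x => x) false).map
        (fun v => name ++ joiner ++ v)) []
  let drifts := (PySem.List.sorted (PySem.Set.inter ck rk) (fun x => x) false).foldl
      (fun (acc : List (String × List String × List String) × List (String × List String × List String)) name =>
        if PySem.Set.equal (pvVers claim_idx name) (pvVers real_idx name) then acc
        else
          if direct_names.contains name then
            (acc.1 ++ [(name, PySem.List.sorted (pvVers claim_idx name) (fun x => x) false, PySem.List.sorted (pvVers real_idx name) (fun x => x) false)], acc.2)
          else
            (acc.1, acc.2 ++ [(name, PySem.List.sorted (pvVers claim_idx name) (fun x => x) false, PySem.List.sorted (pvVers real_idx name) (fun x => x) false)]))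
      ([], [])
  (added, stale, drifts.1, drifts.2)

-- ===== PORT B =====
-- the while loop of Source B: the two indices i, j become the remaining suffixes of the two
-- sorted key lists; the four accumulator lists are the state
def pvMergeLoop (claim_idx : List (String × List String)) (real_idx : List (String × List String)) (direct_names : List String) (joiner : String) :
    List String → List String →
    List String × List String × (List (String × List String × List String)) × (List (String × List String × List String)) →
    List String × List String × (List (String × List String × List String)) × (List (String × List String × List String))
  | [], [], st => st
  | c :: cs, [], st =>
      pvMergeLoop claim_idx real_idx direct_names joiner cs []
        (st.1, st.2.1 ++ (PySem.List.sorted (pvVers claim_idx c) (fun x => x) false).map (fun v => c ++ joiner ++ v), st.2.2.1, st.2.2.2)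
  | [], r :: rs, st =>
      pvMergeLoop claim_idx real_idx direct_names joiner [] rs
        (st.1 ++ (PySem.List.sorted (pvVers real_idx r) (fun x => x) false).map (fun v => r ++ joiner ++ v), st.2.1, st.2.2.1, st.2.2.2)
  | c :: cs, r :: rs, st =>
      if c < r then
        pvMergeLoop claim_idx real_idx direct_names joiner cs (r :: rs)
          (st.1, st.2.1 ++ (PySem.List.sorted (pvVers claim_idx c) (fun x => x) false).map (fun v => c ++ joiner ++ v), st.2.2.1, st.2.2.2)
      else if r < c then
        pvMergeLoop claim_idx real_idx direct_names joiner (c :: cs) rs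
          (st.1 ++ (PySem.List.sorted (pvVers real_idx r) (fun x => x) false).map (fun v => r ++ joiner ++ v), st.2.1, st.2.2.1, st.2.2.2)
      else
        pvMergeLoop claim_idx real_idx direct_names joiner cs rs
          (if PySem.Set.equal (pvVers claim_idx c) (pvVers real_idx c) then st
           else if direct_names.contains c then
             (st.1, st.2.1, st.2.2.1 ++ [(c, PySem.List.sorted (pvVers claim_idx c) (fun x => x) false, PySem.List.sorted (pvVers real_idx c) (fun x => x) false)], st.2.2.2)
           else
             (st.1, st.2.1, st.2.2.1, st.2.2.2 ++ [(c, PySem.List.sorted (pvVers claim_idx c) (fun x => x) false, PySem.List.sorted (pvVers real_idx c) (fun x => x) false)]))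
  termination_by xs ys _ => xs.length + ys.length

def diff_simple_alt (claim_idx : List (String × List String)) (real_idx : List (String × List String)) (direct_names : List String) (joiner : String) : List String × List String × (List (String × List String × List String)) × (List (String × List String × List String)) :=
  let ck := PySem.List.sorted (PySem.Set.ofList (claim_idx.map Prod.fst)) (fun x => x) false
  let rk := PySem.List.sorted (PySem.Set.ofList (real_idx.map Prod.fst)) (fun x => x) false
  pvMergeLoop claim_idx real_idx direct_names joiner ck rk ([], [], [], [])

-- ===== PRECONDITION & SPEC =====
def Spec_diff_simple (claim_idx : List (String × List String)) (real_idx : List (String × List String)) (direct_names : List String) (joiner : String) (out : List String × List String × (List (String × List String × List String)) × (List (String × List String × List String))) : Prop := out = diff_simple_alt claim_idx real_idx direct_names joiner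
instance (claim_idx : List (String × List String)) (real_idx : List (String × List String)) (direct_names : List String) (joiner : String) (out : List String × List String × (List (String × List String × List String)) × (List (String × List String × List String))) : Decidable (Spec_diff_simple claim_idx real_idx direct_names joiner out) := by
  unfold Spec_diff_simple
  have h1 : DecidableEq (List (String × List String × List String)) := inferInstance
  have h2 : DecidableEq (List (String × List String × List String) × List (String × List String × List String)) := @instDecidableEqProd _ _ h1 h1
  have h3 : DecidableEq (List String × List (String × List String × List String) × List (String × List String × List String)) := @instDecidableEqProd _ _ inferInstance h2
  have h4 : DecidableEq (List String × List String × List (String × List String × List String) × List (String × List String × List String)) := @instDecidableEqProd _ _ inferInstance h3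
  exact h4 _ _

-- ===== CLAIM (what is proved, stated in full; the proofs are below) =====
def Claim_equal_diff_simple : Prop := ∀ (claim_idx : List (String × List String)) (real_idx : List (String × List String)) (direct_names : List String) (joiner : String), Dom_diff_simple claim_idx real_idx direct_names joiner → Spec_diff_simple claim_idx real_idx direct_names joiner (diff_simple claim_idx real_idx direct_names joiner)

-- ===== LEMMAS AND PROOFS =====

-- the per-name classification step, parametrised by the two key-membership tests
def pvStep (claim_idx : List (String × List String)) (real_idx : List (String × List String)) (direct_names : List String) (joiner : String) (inC inR : String → Bool)
    (st : List String × List String × (List (String × List String × List String)) × (List (String × List String × List String))) (name : String) :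
    List String × List String × (List (String × List String × List String)) × (List (String × List String × List String)) :=
  if !(inC name) then
    (st.1 ++ (PySem.List.sorted (pvVers real_idx name) (fun x => x) false).map (fun v => name ++ joiner ++ v), st.2.1, st.2.2.1, st.2.2.2)
  else if !(inR name) then
    (st.1, st.2.1 ++ (PySem.List.sorted (pvVers claim_idx name) (fun x => x) false).map (fun v => name ++ joiner ++ v), st.2.2.1, st.2.2.2)
  else
    if PySem.Set.equal (pvVers claim_idx name) (pvVers real_idx name) then st
    else
      if direct_names.contains name then
        (st.1, st.2.1, st.2.2.1 ++ [(name, PySem.List.sorted (pvVers claim_idx name) (fun x => x) false, PySem.List.sorted (pvVers real_idx name) (fun x => x) false)], st.2.2.2)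
      else
        (st.1, st.2.1, st.2.2.1, st.2.2.2 ++ [(name, PySem.List.sorted (pvVers claim_idx name) (fun x => x) false, PySem.List.sorted (pvVers real_idx name) (fun x => x) false)])

-- plain key-merge of two sorted lists (proof-side skeleton of the merge walk)
def pvMergeU : List String → List String → List String
  | [], ys => ys
  | x :: xs, [] => x :: pvMergeU xs []
  | x :: xs, y :: ys =>
      if x < y then x :: pvMergeU xs (y :: ys)
      else if y < x then y :: pvMergeU (x :: xs) ys
      else x :: pvMergeU xs ys
  termination_by xs ys => xs.length + ys.length

theorem mem_pvMergeU (xs ys : List String) (a : String) :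
    a ∈ pvMergeU xs ys ↔ a ∈ xs ∨ a ∈ ys := by
  fun_induction pvMergeU xs ys with
  | case1 ys => simp
  | case2 x xs ih => simp [ih]
  | case3 x xs y ys hlt ih => simp [ih]; tauto
  | case4 x xs y ys hlt hgt ih => simp [ih]; tauto
  | case5 x xs y ys hlt hgt ih =>
      have hxy : x = y := le_antisymm (not_lt.1 hgt) (not_lt.1 hlt)
      simp [ih, hxy]; tauto

theorem pairwise_lt_pvMergeU {xs ys : List String}
    (hx : xs.Pairwise (· < ·)) (hy : ys.Pairwise (· < ·)) :
    (pvMergeU xs ys).Pairwise (· < ·) := by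
  fun_induction pvMergeU xs ys with
  | case1 ys => exact hy
  | case2 x xs ih =>
      rw [List.pairwise_cons]
      refine ⟨?_, ih hx.of_cons hy⟩
      intro a ha
      rcases (mem_pvMergeU _ _ _).1 ha with h | h
      · exact List.rel_of_pairwise_cons hx h
      · simp at h
  | case3 x xs y ys hlt ih =>
      rw [List.pairwise_cons]
      refine ⟨?_, ih hx.of_cons hy⟩
      intro a ha
      rcases (mem_pvMergeU _ _ _).1 ha with h | h
      · exact List.rel_of_pairwise_cons hx h
      · rcases List.mem_cons.1 h with h | h
        · exact h ▸ hlt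
        · exact lt_trans hlt (List.rel_of_pairwise_cons hy h)
  | case4 x xs y ys hlt hgt ih =>
      rw [List.pairwise_cons]
      refine ⟨?_, ih hx hy.of_cons⟩
      intro a ha
      rcases (mem_pvMergeU _ _ _).1 ha with h | h
      · rcases List.mem_cons.1 h with h | h
        · exact h ▸ hgt
        · exact lt_trans hgt (List.rel_of_pairwise_cons hx h)
      · exact List.rel_of_pairwise_cons hy h
  | case5 x xs y ys hlt hgt ih =>
      have hxy : x = y := le_antisymm (not_lt.1 hgt) (not_lt.1 hlt)
      rw [List.pairwise_cons]
      refine ⟨?_, ih hx.of_cons hy.of_cons⟩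
      intro a ha
      rcases (mem_pvMergeU _ _ _).1 ha with h | h
      · exact List.rel_of_pairwise_cons hx h
      · exact hxy ▸ List.rel_of_pairwise_cons hy h

-- head of a strictly sorted list is not in its tail nor in anything it is below
theorem pv_head_not_mem {x : String} {xs : List String} (h : (x :: xs).Pairwise (· < ·)) : x ∉ xs := by
  intro hx
  exact lt_irrefl x (List.rel_of_pairwise_cons h hx)

-- the [] claim-keys case of the merge loop: every remaining real key is added
theorem pvMergeLoop_eq_foldl_nil (ci ri : List (String × List String)) (dn : List String) (j : String) :
    ∀ (ys : List String), ys.Pairwise (· < ·) →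
    ∀ st, pvMergeLoop ci ri dn j [] ys st
        = ys.foldl (pvStep ci ri dn j (List.contains [] ·) (List.contains ys ·)) st := by
  intro ys
  induction ys with
  | nil => intro _ st; rw [pvMergeLoop]; rfl
  | cons r rs ih =>
      intro hy st
      rw [pvMergeLoop, List.foldl_cons, ih hy.of_cons]
      -- with no claim keys left, pvStep always takes the `added` branch: inR is irrelevant
      have hcongr : ∀ st' a, a ∈ rs →
          pvStep ci ri dn j (List.contains [] ·) (List.contains (r :: rs) ·) st' a
          = pvStep ci ri dn j (List.contains [] ·) (List.contains rs ·) st' a := by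
        intro st' a _
        simp [pvStep]
      rw [PySem.List.foldl_congr_mem _ _ _ _ hcongr]
      congr 1

-- the merge loop of B is the classification fold over the merged key list
theorem pvMergeLoop_eq_foldl (ci ri : List (String × List String)) (dn : List String) (j : String) :
    ∀ (xs ys : List String), xs.Pairwise (· < ·) → ys.Pairwise (· < ·) →
    ∀ st, pvMergeLoop ci ri dn j xs ys st
        = (pvMergeU xs ys).foldl (pvStep ci ri dn j (xs.contains ·) (ys.contains ·)) st := by
  intro xs ys
  fun_induction pvMergeU xs ys with
  | case1 ys =>
      intro _ hy st
      exact pvMergeLoop_eq_foldl_nil ci ri dn j ys hy st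
  | case2 x xs ih =>
      intro hx hy st
      rw [pvMergeLoop, List.foldl_cons, ih hx.of_cons hy]
      have hxn : x ∉ xs := pv_head_not_mem hx
      have hcongr : ∀ st' a, a ∈ pvMergeU xs [] →
          pvStep ci ri dn j (List.contains (x :: xs) ·) (List.contains [] ·) st' a
          = pvStep ci ri dn j (List.contains xs ·) (List.contains [] ·) st' a := by
        intro st' a ha
        have ham : a ∈ xs := by simpa [mem_pvMergeU] using ha
        have : a ≠ x := fun h => hxn (h ▸ ham)
        simp [pvStep, this]
      rw [PySem.List.foldl_congr_mem _ _ _ _ hcongr]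
      congr 1
      have hCx : (x :: xs).contains x = true := by simp
      simp only [pvStep]
      simp only [hCx]
      simp
  | case3 x xs y ys hlt ih =>
      intro hx hy st
      have hxn : x ∉ xs := pv_head_not_mem hx
      have hxys : x ∉ y :: ys := by
        intro hmem
        rcases List.mem_cons.1 hmem with hmem | hmem
        · exact lt_irrefl y (hmem ▸ hlt)
        · exact lt_irrefl x (lt_trans hlt (List.rel_of_pairwise_cons hy hmem))
      rw [pvMergeLoop, if_pos hlt, List.foldl_cons, ih hx.of_cons hy]
      have hcongr : ∀ st' a, a ∈ pvMergeU xs (y :: ys) →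
          pvStep ci ri dn j (List.contains (x :: xs) ·) (List.contains (y :: ys) ·) st' a
          = pvStep ci ri dn j (List.contains xs ·) (List.contains (y :: ys) ·) st' a := by
        intro st' a ha
        have ham : a ∈ xs ∨ a ∈ y :: ys := by simpa [mem_pvMergeU] using ha
        have hne : a ≠ x := by
          rintro rfl
          rcases ham with h | h
          · exact hxn h
          · exact hxys h
        simp [pvStep, hne]
      rw [PySem.List.foldl_congr_mem _ _ _ _ hcongr]
      congr 1
      have hyb : (y :: ys).contains x = false := by
        rw [Bool.eq_false_iff]
        intro h
        exact hxys (List.contains_iff_mem.mp h)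
      have hCx : (x :: xs).contains x = true := by simp
      simp only [pvStep]
      simp only [hCx, hyb]
      simp
  | case4 x xs y ys hlt hgt ih =>
      intro hx hy st
      have hyn : y ∉ ys := pv_head_not_mem hy
      have hyxs : y ∉ x :: xs := by
        intro hmem
        rcases List.mem_cons.1 hmem with hmem | hmem
        · exact lt_irrefl x (hmem ▸ hgt)
        · exact lt_irrefl y (lt_trans hgt (List.rel_of_pairwise_cons hx hmem))
      rw [pvMergeLoop, if_neg (by exact hlt), if_pos hgt, List.foldl_cons, ih hx hy.of_cons]
      have hcongr : ∀ st' a, a ∈ pvMergeU (x :: xs) ys →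
          pvStep ci ri dn j (List.contains (x :: xs) ·) (List.contains (y :: ys) ·) st' a
          = pvStep ci ri dn j (List.contains (x :: xs) ·) (List.contains ys ·) st' a := by
        intro st' a ha
        have ham : a ∈ x :: xs ∨ a ∈ ys := by simpa [mem_pvMergeU] using ha
        have hne : a ≠ y := by
          rintro rfl
          rcases ham with h | h
          · exact hyxs h
          · exact hyn h
        simp [pvStep, hne]
      rw [PySem.List.foldl_congr_mem _ _ _ _ hcongr]
      congr 1
      have hcb : (x :: xs).contains y = false := by
        rw [Bool.eq_false_iff]
        intro h
        exact hyxs (List.contains_iff_mem.mp h)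
      have hRy : (y :: ys).contains y = true := by simp
      simp only [pvStep]
      simp only [hcb, hRy]
      simp
  | case5 x xs y ys hlt hgt ih =>
      intro hx hy st
      have hxy : x = y := le_antisymm (not_lt.1 hgt) (not_lt.1 hlt)
      subst hxy
      have hxn : x ∉ xs := pv_head_not_mem hx
      have hyn : x ∉ ys := pv_head_not_mem hy
      rw [pvMergeLoop, if_neg (by exact hlt), if_neg (by exact hgt), List.foldl_cons, ih hx.of_cons hy.of_cons]
      have hcongr : ∀ st' a, a ∈ pvMergeU xs ys →
          pvStep ci ri dn j (List.contains (x :: xs) ·) (List.contains (x :: ys) ·) st' a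
          = pvStep ci ri dn j (List.contains xs ·) (List.contains ys ·) st' a := by
        intro st' a ha
        have ham : a ∈ xs ∨ a ∈ ys := by simpa [mem_pvMergeU] using ha
        have hne : a ≠ x := by
          rintro rfl
          rcases ham with h | h
          · exact hxn h
          · exact hyn h
        simp [pvStep, hne]
      rw [PySem.List.foldl_congr_mem _ _ _ _ hcongr]
      congr 1
      simp [pvStep]


-- sorted of a duplicate-free list of strings is strictly increasing
theorem pv_sorted_pairwise_lt {xs : List String} (h : xs.Nodup) :
    (PySem.List.sorted xs (fun x => x) false).Pairwise (· < ·) := by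
  have hp := PySem.List.sorted_pairwise xs (fun x => x)
  have hn : (PySem.List.sorted xs (fun x => x) false).Nodup :=
    ((PySem.List.sorted_perm xs (fun x => x) false).nodup_iff).2 h
  exact (hp.and hn).imp (fun {a b} hab => lt_of_le_of_ne hab.1 hab.2)

-- sorted of a set described by a filter predicate is the filtered sorted union
theorem pv_sorted_filter_eq {xs ys : List String} {p : String → Bool}
    (hx : xs.Nodup) (hy : ys.Nodup)
    (hmem : ∀ x, x ∈ ys ↔ x ∈ xs ∧ p x = true) :
    PySem.List.sorted ys (fun x => x) false
      = (PySem.List.sorted xs (fun x => x) false).filter p := by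
  apply PySem.List.sorted_eq_of_perm_of_pairwise_lt
  · apply (List.perm_ext_iff_of_nodup (List.Nodup.filter _ (((PySem.List.sorted_perm xs (fun x => x) false).nodup_iff).2 hx)) hy).2
    intro a
    simp only [List.mem_filter, PySem.List.mem_sorted, hmem]
  · exact (pv_sorted_pairwise_lt hx).filter p

theorem pv_not_contains_iff (s : PySem.Set String) (x : String) :
    (!PySem.Set.contains s x) = true ↔ x ∉ s := by
  rw [Bool.not_eq_true']
  constructor
  · intro h hx
    rw [(PySem.Set.contains_iff s x).2 hx] at h
    cases h
  · intro hx
    cases h : PySem.Set.contains s x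
    · rfl
    · exact absurd ((PySem.Set.contains_iff s x).1 h) hx

theorem pv_flatMap_if {α β : Type} (p : α → Bool) (g : α → List β) (l : List α) :
    List.flatMap g (l.filter p) = List.flatMap (fun x => if p x then g x else []) l := by
  induction l with
  | nil => rfl
  | cons x t ih =>
    by_cases hx : p x = true
    · simp [hx, ih]
    · simp [hx, ih]

-- a loop appending to two independent list accumulators is two flatMaps
theorem pv_foldl_pair_split {α β γ : Type} (u : α → List β) (v : α → List γ)
    (step : List β × List γ → α → List β × List γ)
    (hstep : ∀ acc x, step acc x = (acc.1 ++ u x, acc.2 ++ v x)) :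
    ∀ (l : List α) (a : List β) (b : List γ),
      l.foldl step (a, b) = (a ++ List.flatMap u l, b ++ List.flatMap v l) := by
  intro l
  induction l with
  | nil => intro a b; simp
  | cons x t ih =>
    intro a b
    simp only [List.foldl_cons, hstep, List.flatMap_cons, ← List.append_assoc]
    exact ih _ _

-- a loop appending to four independent list accumulators is four flatMaps
theorem pv_foldl_quad_split {α β γ δ ε : Type} (u : α → List β) (v : α → List γ)
    (w : α → List δ) (z : α → List ε)
    (step : List β × List γ × List δ × List ε → α → List β × List γ × List δ × List ε)
    (hstep : ∀ acc x, step acc x = (acc.1 ++ u x, acc.2.1 ++ v x, acc.2.2.1 ++ w x, acc.2.2.2 ++ z x)) :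
    ∀ (l : List α) (a : List β) (b : List γ) (c : List δ) (d : List ε),
      l.foldl step (a, b, c, d) = (a ++ List.flatMap u l, b ++ List.flatMap v l, c ++ List.flatMap w l, d ++ List.flatMap z l) := by
  intro l
  induction l with
  | nil => intro a b c d; simp
  | cons x t ih =>
    intro a b c d
    simp only [List.foldl_cons, hstep, List.flatMap_cons, ← List.append_assoc]
    exact ih _ _ _ _

-- ===== VERDICT (by name: the statement is the Claim_ definition above) =====
set_option maxHeartbeats 2000000 in
theorem diff_simple_spec : Claim_equal_diff_simple := by
  intro ci ri dn j _hdom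
  unfold Spec_diff_simple diff_simple diff_simple_alt
  dsimp only
  set ck : PySem.Set String := PySem.Set.ofList (List.map Prod.fst ci) with hck
  set rk : PySem.Set String := PySem.Set.ofList (List.map Prod.fst ri) with hrk
  have hnck : ck.Nodup := PySem.Set.nodup_ofList _
  have hnrk : rk.Nodup := PySem.Set.nodup_ofList _
  have hnu : (PySem.Set.union ck rk).Nodup := PySem.Set.nodup_union ck rk hnck
  set sc := PySem.List.sorted ck (fun x => x) false with hsc
  set sr := PySem.List.sorted rk (fun x => x) false with hsr
  have hpsc : sc.Pairwise (· < ·) := pv_sorted_pairwise_lt hnck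
  have hpsr : sr.Pairwise (· < ·) := pv_sorted_pairwise_lt hnrk
  -- B's merge walk is the classification fold over the sorted union
  have hmerge := pvMergeLoop_eq_foldl ci ri dn j sc sr hpsc hpsr ([], [], [], [])
  have hmU : PySem.List.sorted (PySem.Set.union ck rk) (fun x => x) false = pvMergeU sc sr := by
    apply PySem.List.sorted_eq_of_perm_of_pairwise_lt
    · apply (List.perm_ext_iff_of_nodup
        ((pairwise_lt_pvMergeU hpsc hpsr).imp (fun {a b} h => ne_of_lt h)) hnu).2
      intro a
      rw [mem_pvMergeU, PySem.Set.mem_union, hsc, hsr,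
        PySem.List.mem_sorted, PySem.List.mem_sorted]
    · exact pairwise_lt_pvMergeU hpsc hpsr
  have hcC : ∀ a, List.contains sc a = PySem.Set.contains ck a := by
    intro a
    rw [Bool.eq_iff_iff, List.contains_iff_mem, hsc, PySem.List.mem_sorted]
    exact (PySem.Set.contains_iff ck a).symm
  have hcR : ∀ a, List.contains sr a = PySem.Set.contains rk a := by
    intro a
    rw [Bool.eq_iff_iff, List.contains_iff_mem, hsr, PySem.List.mem_sorted]
    exact (PySem.Set.contains_iff rk a).symm
  have hBfold : pvMergeLoop ci ri dn j sc sr ([], [], [], [])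
      = (PySem.List.sorted (PySem.Set.union ck rk) (fun x => x) false).foldl
          (pvStep ci ri dn j (PySem.Set.contains ck) (PySem.Set.contains rk)) ([], [], [], []) := by
    rw [hmerge, hmU]
    apply PySem.List.foldl_congr_mem
    intro acc x _
    simp only [pvStep, hcC, hcR]
  rw [hBfold]
  -- now both sides over the same sorted union: normalise to flatMaps
  have h1 : PySem.List.sorted (PySem.Set.diff rk ck) (fun x => x) false
      = (PySem.List.sorted (PySem.Set.union ck rk) (fun x => x) false).filter
          (fun n => !PySem.Set.contains ck n) := by
    apply pv_sorted_filter_eq hnu (PySem.Set.nodup_diff rk ck hnrk)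
    intro x
    rw [PySem.Set.mem_diff, PySem.Set.mem_union, pv_not_contains_iff]
    tauto
  have h2 : PySem.List.sorted (PySem.Set.diff ck rk) (fun x => x) false
      = (PySem.List.sorted (PySem.Set.union ck rk) (fun x => x) false).filter
          (fun n => PySem.Set.contains ck n && !PySem.Set.contains rk n) := by
    apply pv_sorted_filter_eq hnu (PySem.Set.nodup_diff ck rk hnck)
    intro x
    rw [PySem.Set.mem_diff, PySem.Set.mem_union, Bool.and_eq_true, PySem.Set.contains_iff, pv_not_contains_iff]
    tauto
  have h3 : PySem.List.sorted (PySem.Set.inter ck rk) (fun x => x) false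
      = (PySem.List.sorted (PySem.Set.union ck rk) (fun x => x) false).filter
          (fun n => PySem.Set.contains ck n && PySem.Set.contains rk n) := by
    apply pv_sorted_filter_eq hnu (PySem.Set.nodup_inter ck rk hnck)
    intro x
    rw [PySem.Set.mem_inter, PySem.Set.mem_union, Bool.and_eq_true, PySem.Set.contains_iff, PySem.Set.contains_iff]
    tauto
  -- split A's drift loop into two flatMaps
  have hsplitA := pv_foldl_pair_split
    (fun name => if PySem.Set.equal (pvVers ci name) (pvVers ri name) then []
      else if dn.contains name then [(name, PySem.List.sorted (pvVers ci name) (fun x => x) false, PySem.List.sorted (pvVers ri name) (fun x => x) false)] else [])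
    (fun name => if PySem.Set.equal (pvVers ci name) (pvVers ri name) then []
      else if dn.contains name then [] else [(name, PySem.List.sorted (pvVers ci name) (fun x => x) false, PySem.List.sorted (pvVers ri name) (fun x => x) false)])
    (fun (acc : List (String × List String × List String) × List (String × List String × List String)) name =>
        if PySem.Set.equal (pvVers ci name) (pvVers ri name) then acc
        else
          if dn.contains name then
            (acc.1 ++ [(name, PySem.List.sorted (pvVers ci name) (fun x => x) false, PySem.List.sorted (pvVers ri name) (fun x => x) false)], acc.2)
          else
            (acc.1, acc.2 ++ [(name, PySem.List.sorted (pvVers ci name) (fun x => x) false, PySem.List.sorted (pvVers ri name) (fun x => x) false)]))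
    (by
      intro acc n
      by_cases he : PySem.Set.equal (pvVers ci n) (pvVers ri n) = true
      · simp [he]
      · by_cases hd : n ∈ dn <;> simp [he, hd])
  -- split B's classification fold into four flatMaps
  have hsplitB := pv_foldl_quad_split
    (fun name => if !PySem.Set.contains ck name then (PySem.List.sorted (pvVers ri name) (fun x => x) false).map (fun v => name ++ j ++ v) else [])
    (fun name => if !PySem.Set.contains ck name then []
      else if !PySem.Set.contains rk name then (PySem.List.sorted (pvVers ci name) (fun x => x) false).map (fun v => name ++ j ++ v) else [])
    (fun name => if !PySem.Set.contains ck name then []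
      else if !PySem.Set.contains rk name then []
      else if PySem.Set.equal (pvVers ci name) (pvVers ri name) then []
      else if dn.contains name then [(name, PySem.List.sorted (pvVers ci name) (fun x => x) false, PySem.List.sorted (pvVers ri name) (fun x => x) false)] else [])
    (fun name => if !PySem.Set.contains ck name then []
      else if !PySem.Set.contains rk name then []
      else if PySem.Set.equal (pvVers ci name) (pvVers ri name) then []
      else if dn.contains name then [] else [(name, PySem.List.sorted (pvVers ci name) (fun x => x) false, PySem.List.sorted (pvVers ri name) (fun x => x) false)])
    (pvStep ci ri dn j (PySem.Set.contains ck) (PySem.Set.contains rk))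
    (by
      intro acc n
      by_cases hc : n ∈ ck <;> by_cases hr : n ∈ rk <;>
        by_cases he : PySem.Set.equal (pvVers ci n) (pvVers ri n) = true <;>
        by_cases hd : n ∈ dn <;>
        simp [pysem, pvStep, hc, hr, he, hd])
  rw [hsplitA, hsplitB, h1, h2, h3]
  simp only [PySem.List.foldl_append_eq_flatMap, List.nil_append, pv_flatMap_if]
  simp only [Prod.mk.injEq]
  refine ⟨?_, ?_, ?_, ?_⟩
  · trivial
  · congr 1
    funext n
    by_cases hc : n ∈ ck <;> by_cases hr : n ∈ rk <;> simp [hc, hr]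
  · congr 1
    funext n
    by_cases hc : n ∈ ck <;> by_cases hr : n ∈ rk <;> simp [hc, hr]
  · congr 1
    funext n
    by_cases hc : n ∈ ck <;> by_cases hr : n ∈ rk <;> simp [hc, hr]
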